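-- pv_equiv track=rewrite | github.com/JackieMaw/AdventOfCode | python/2023/2023day12b_clever_brute_force.py | split_by_max_hash
-- ===== SOURCE A (Python) =====
-- def split_by_max_hash(condition_record_chunks, max_num):
--     all_groups_of_chunks = []
--
--     accumulated_chunks = []
--     for chunk in condition_record_chunks:
--         if chunk.count('#') == max_num:
--             all_groups_of_chunks.append(accumulated_chunks)
--             accumulated_chunks = []
--
--             # what to do with the max chunk?
--             # add the max as it's own group
--             all_groups_of_chunks.append([chunk])
--             # surround by dots
--             index_of_first_hash = chunk.index("#")
--         else:
--             accumulated_chunks.append(chunk)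
--
--     if len(accumulated_chunks) > 0:
--         all_groups_of_chunks.append(accumulated_chunks)
--
--     return all_groups_of_chunks
-- ===== SOURCE B (Python) =====
-- def split_by_max_hash(condition_record_chunks, max_num):
--     # One pass to collect the max-hash split points, then rebuild the groups by slicing.
--     chunks = list(condition_record_chunks)
--     splits = [(i, c) for i, c in enumerate(chunks) if c.count('#') == max_num]
--     groups = []
--     prev = 0
--     for i, c in splits:
--         groups.append(chunks[prev:i])
--         groups.append([c])
--         prev = i + 1
--     tail = chunks[prev:]
--     if tail:
--         groups.append(tail)
--     return groups
-- ===== Notes on version B (the rewrite author's own statement) =====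
-- stated objective: alternative
-- what changed: A folds once over the chunks with a pending accumulator flushed at each max-hash chunk; B first collects the max-hash split positions and then rebuilds the groups by slicing the list between consecutive split points.
import Mathlib
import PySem

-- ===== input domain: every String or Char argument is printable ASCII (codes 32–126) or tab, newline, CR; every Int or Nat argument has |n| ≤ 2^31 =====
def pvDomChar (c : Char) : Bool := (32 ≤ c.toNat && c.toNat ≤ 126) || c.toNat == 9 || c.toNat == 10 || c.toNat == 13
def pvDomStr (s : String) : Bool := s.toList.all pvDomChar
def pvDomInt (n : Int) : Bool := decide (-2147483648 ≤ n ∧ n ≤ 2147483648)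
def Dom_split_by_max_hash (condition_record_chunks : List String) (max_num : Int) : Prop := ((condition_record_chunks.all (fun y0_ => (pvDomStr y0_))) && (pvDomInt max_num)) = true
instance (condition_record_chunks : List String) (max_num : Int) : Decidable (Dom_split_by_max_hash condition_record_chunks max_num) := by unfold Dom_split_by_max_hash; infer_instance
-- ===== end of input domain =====

-- B replaces A's accumulator fold by collecting the max-hash split positions first and slicing between them (objective: alternative, same cost).
-- A's dead 'index_of_first_hash = chunk.index("#")' raises ValueError when the max-hash chunk has no '#';
-- exactly those inputs are excluded by Pre_.

-- ===== PORT A =====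
def split_by_max_hash (condition_record_chunks : List String) (max_num : Int) : List (List String) :=
  let st := condition_record_chunks.foldl
    (fun (st : List (List String) × List String) chunk =>
      if (PySem.Str.count chunk "#" : Int) = max_num then
        -- Python also computes index_of_first_hash = chunk.index("#") here (unused;
        -- raises ValueError when '#' is absent — exactly the inputs Pre_ excludes):
        let _index_of_first_hash := PySem.Str.find chunk "#"
        (st.1 ++ [st.2] ++ [[chunk]], [])
      else
        (st.1, st.2 ++ [chunk]))
    ([], [])
  if st.2.length > 0 then st.1 ++ [st.2] else st.1

-- ===== PORT B =====
def split_by_max_hash_alt (condition_record_chunks : List String) (max_num : Int) : List (List String) :=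
  let splits := (PySem.List.enumerate condition_record_chunks 0).filter
    (fun p => decide ((PySem.Str.count p.2 "#" : Int) = max_num))
  let st := splits.foldl
    (fun (st : List (List String) × Int) p =>
      (st.1 ++ [PySem.List.slice condition_record_chunks (some st.2) (some p.1)] ++ [[p.2]], p.1 + 1))
    ([], 0)
  let tail := PySem.List.slice condition_record_chunks (some st.2) none
  if tail.length > 0 then st.1 ++ [tail] else st.1

-- ===== PRECONDITION & SPEC =====
-- Pre_ excludes exactly the inputs on which A raises ValueError at its dead 'chunk.index("#")':
-- max_num = 0 together with a chunk containing no '#' (there B simply returns the normal grouping).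
def Pre_split_by_max_hash (condition_record_chunks : List String) (max_num : Int) : Prop :=
  ∀ c ∈ condition_record_chunks, (PySem.Str.count c "#" : Int) = max_num → PySem.Str.count c "#" ≠ 0
instance (condition_record_chunks : List String) (max_num : Int) : Decidable (Pre_split_by_max_hash condition_record_chunks max_num) := by unfold Pre_split_by_max_hash; infer_instance

def pvWitness_split_by_max_hash : List String × Int := (["#.", ".", "##"], 1)

def Spec_split_by_max_hash (condition_record_chunks : List String) (max_num : Int) (out : List (List String)) : Prop := out = split_by_max_hash_alt condition_record_chunks max_num
instance (condition_record_chunks : List String) (max_num : Int) (out : List (List String)) : Decidable (Spec_split_by_max_hash condition_record_chunks max_num out) := by unfold Spec_split_by_max_hash; infer_instance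

-- ===== CLAIM (what is proved, stated in full; the proofs are below) =====
def Claim_equal_split_by_max_hash : Prop := ∀ (condition_record_chunks : List String) (max_num : Int), Dom_split_by_max_hash condition_record_chunks max_num → Pre_split_by_max_hash condition_record_chunks max_num → Spec_split_by_max_hash condition_record_chunks max_num (split_by_max_hash condition_record_chunks max_num)

-- ===== LEMMAS AND PROOFS =====

-- the common recursive description both ports are reduced to
def pvRec (max_num : Int) : List String → List (List String)
  | [] => []
  | head :: rest =>
    if (PySem.Str.count head "#" : Int) = max_num then
      [[], [head]] ++ pvRec max_num rest
    else
      match pvRec max_num rest with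
      | [] => [[head]]
      | g :: gs => ([head] ++ g) :: gs

-- merge a pending accumulator into the head group of an already-built grouping
def pvPrepend (acc : List String) : List (List String) → List (List String)
  | [] => if acc.length > 0 then [acc] else []
  | g :: gs => (acc ++ g) :: gs

theorem pvPrepend_nil (r : List (List String)) : pvPrepend [] r = r := by
  cases r <;> simp [pvPrepend]

theorem pvPrepend_append (a b : List String) (r : List (List String)) :
    pvPrepend (a ++ b) r = pvPrepend a (pvPrepend b r) := by
  cases r with
  | nil =>
    cases b with
    | nil => simp [pvPrepend]
    | cons x xs => simp [pvPrepend]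
  | cons g gs => simp [pvPrepend, List.append_assoc]

theorem pvRec_cons_neg (max_num : Int) (c : String) (rest : List String)
    (h : ¬ (PySem.Str.count c "#" : Int) = max_num) :
    pvRec max_num (c :: rest) = pvPrepend [c] (pvRec max_num rest) := by
  rw [pvRec, if_neg h]
  cases pvRec max_num rest <;> simp [pvPrepend]

-- A's loop body, named so the fold can be reasoned about without unfolding string bridges
def pvStepA (max_num : Int) (st : List (List String) × List String) (chunk : String) :
    List (List String) × List String :=
  if (PySem.Str.count chunk "#" : Int) = max_num then
    let _index_of_first_hash := PySem.Str.find chunk "#"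
    (st.1 ++ [st.2] ++ [[chunk]], [])
  else
    (st.1, st.2 ++ [chunk])

theorem pvStepA_eq (max_num : Int) :
    (fun (st : List (List String) × List String) chunk =>
      if (PySem.Str.count chunk "#" : Int) = max_num then
        let _index_of_first_hash := PySem.Str.find chunk "#"
        (st.1 ++ [st.2] ++ [[chunk]], [])
      else
        (st.1, st.2 ++ [chunk])) = pvStepA max_num := rfl

theorem pvStepA_pos (max_num : Int) (g : List (List String)) (a : List String) (c : String)
    (h : (PySem.Str.count c "#" : Int) = max_num) :
    pvStepA max_num (g, a) c = (g ++ [a] ++ [[c]], []) := by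
  unfold pvStepA; rw [if_pos h]

theorem pvStepA_neg (max_num : Int) (g : List (List String)) (a : List String) (c : String)
    (h : ¬ (PySem.Str.count c "#" : Int) = max_num) :
    pvStepA max_num (g, a) c = (g, a ++ [c]) := by
  unfold pvStepA; rw [if_neg h]

-- A's fold equals the recursive description, generalised over loop state
theorem pv_main (max_num : Int) :
    ∀ (l : List String) (groups : List (List String)) (acc : List String),
      (let st := l.foldl (pvStepA max_num) (groups, acc)
       if st.2.length > 0 then st.1 ++ [st.2] else st.1)
      = groups ++ pvPrepend acc (pvRec max_num l) := by
  intro l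
  induction l with
  | nil =>
    intro groups acc
    cases acc <;> simp [pvRec, pvPrepend]
  | cons c rest ih =>
    intro groups acc
    by_cases h : (PySem.Str.count c "#" : Int) = max_num
    · rw [List.foldl_cons, pvStepA_pos max_num groups acc c h, ih]
      rw [pvRec, if_pos h, pvPrepend_nil]
      cases pvRec max_num rest <;> simp [pvPrepend]
    · rw [List.foldl_cons, pvStepA_neg max_num groups acc c h, ih]
      rw [pvRec_cons_neg max_num c rest h, ← pvPrepend_append]

-- B's loop body, named likewise
def pvStepB (chunks : List String) (st : List (List String) × Int) (p : Int × String) :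
    List (List String) × Int :=
  (st.1 ++ [PySem.List.slice chunks (some st.2) (some p.1)] ++ [[p.2]], p.1 + 1)

theorem pvStepB_eq (chunks : List String) :
    (fun (st : List (List String) × Int) (p : Int × String) =>
      (st.1 ++ [PySem.List.slice chunks (some st.2) (some p.1)] ++ [[p.2]], p.1 + 1)) = pvStepB chunks := rfl

-- extending a slice by one element sitting right at its upper bound
theorem pv_slice_snoc (pre : List String) (c : String) (l : List String) (prev : Nat)
    (hp : prev ≤ pre.length) :
    PySem.List.slice (pre ++ c :: l) (some (prev : Int)) (some ((pre.length : Int) + 1))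
      = PySem.List.slice (pre ++ c :: l) (some (prev : Int)) (some (pre.length : Int)) ++ [c] := by
  have h1 : ((pre.length : Int) + 1) = ((pre.length + 1 : Nat) : Int) := by push_cast; ring
  rw [h1, PySem.List.slice_natCast, PySem.List.slice_natCast]
  rw [List.drop_append_of_le_length hp]
  have hd : (pre.drop prev).length = pre.length - prev := List.length_drop ..
  have h2 : pre.length + 1 - prev = (pre.drop prev).length + 1 := by omega
  have h3 : pre.length - prev = (pre.drop prev).length := by omega
  rw [h2, h3]
  rw [show (pre.drop prev).length + 1 = (pre.drop prev).length + 1 from rfl]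
  rw [List.take_append, List.take_append]
  simp

-- B's slicing fold equals the recursive description, generalised over the processed prefix and loop state
theorem pv_alt_main (max_num : Int) :
    ∀ (l pre : List String) (groups : List (List String)) (prev : Nat), prev ≤ pre.length →
      (let st := ((PySem.List.enumerate l (pre.length : Int)).filter
          (fun p => decide ((PySem.Str.count p.2 "#" : Int) = max_num))).foldl
          (pvStepB (pre ++ l)) (groups, (prev : Int))
       let tail := PySem.List.slice (pre ++ l) (some st.2) none
       if tail.length > 0 then st.1 ++ [tail] else st.1)
      = groups ++ pvPrepend (PySem.List.slice (pre ++ l) (some (prev : Int)) (some (pre.length : Int)))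
          (pvRec max_num l) := by
  intro l
  induction l with
  | nil =>
    intro pre groups prev hp
    simp only [PySem.List.enumerate_nil, List.filter_nil, List.foldl_nil, List.append_nil,
      PySem.List.slice_from_natCast, PySem.List.slice_natCast, pvRec, pvPrepend]
    rw [List.take_of_length_le (by simp)]
    cases hd : pre.drop prev <;> simp
  | cons c rest ih =>
    intro pre groups prev hp
    rw [PySem.List.enumerate_cons]
    by_cases h : (PySem.Str.count c "#" : Int) = max_num
    · rw [List.filter_cons_of_pos (by simpa using h), List.foldl_cons]
      have hstep : pvStepB (pre ++ c :: rest) (groups, (prev : Int)) ((pre.length : Int), c)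
          = (groups ++ [PySem.List.slice (pre ++ c :: rest) (some (prev : Int)) (some (pre.length : Int))] ++ [[c]],
             (((pre.length + 1 : Nat) : Int))) := by
        unfold pvStepB
        simp only [Prod.mk.injEq]
        refine ⟨trivial, ?_⟩
        push_cast
        ring
      rw [hstep]
      have hlen : ((pre.length : Int) + 1) = (((pre ++ [c]).length : Nat) : Int) := by
        simp
      have hlist : pre ++ c :: rest = (pre ++ [c]) ++ rest := by simp
      have := ih (pre ++ [c])
        (groups ++ [PySem.List.slice (pre ++ c :: rest) (some (prev : Int)) (some (pre.length : Int))] ++ [[c]])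
        ((pre ++ [c]).length) (le_refl _)
      rw [← hlist] at this
      have harg : ((pre.length + 1 : Nat) : Int) = (((pre ++ [c]).length : Nat) : Int) := by
        simp
      rw [show ((pre.length : Int) + 1) = ((pre.length + 1 : Nat) : Int) from by push_cast; ring,
        harg]
      rw [this]
      have hempty : PySem.List.slice (pre ++ c :: rest) (some (((pre ++ [c]).length : Nat) : Int))
          (some (((pre ++ [c]).length : Nat) : Int)) = [] := by
        rw [PySem.List.slice_natCast]; simp
      rw [hempty, pvPrepend_nil]
      rw [pvRec, if_pos h]
      cases pvRec max_num rest <;> simp [pvPrepend]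
    · rw [List.filter_cons_of_neg (by simpa using h)]
      have hlen : ((pre.length : Int) + 1) = (((pre ++ [c]).length : Nat) : Int) := by
        simp
      have hlist : pre ++ c :: rest = (pre ++ [c]) ++ rest := by simp
      have := ih (pre ++ [c]) groups prev (by simp; omega)
      rw [← hlist, ← hlen] at this
      rw [this]
      rw [pv_slice_snoc pre c rest prev hp, pvPrepend_append,
        pvRec_cons_neg max_num c rest h]

theorem pv_eq (condition_record_chunks : List String) (max_num : Int) :
    split_by_max_hash condition_record_chunks max_num
      = split_by_max_hash_alt condition_record_chunks max_num := by
  have hslice : PySem.List.slice condition_record_chunks (some ((0 : Nat) : Int)) (some ((0 : Nat) : Int)) = [] := by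
    rw [PySem.List.slice_natCast]; simp
  have hA' : split_by_max_hash condition_record_chunks max_num = pvRec max_num condition_record_chunks := by
    unfold split_by_max_hash
    rw [pvStepA_eq]
    simpa [pvPrepend_nil] using pv_main max_num condition_record_chunks [] []
  have hB' : split_by_max_hash_alt condition_record_chunks max_num = pvRec max_num condition_record_chunks := by
    unfold split_by_max_hash_alt
    rw [pvStepB_eq]
    have := pv_alt_main max_num condition_record_chunks [] [] 0 (by simp)
    rw [List.nil_append] at this
    simp only [List.nil_append, List.length_nil] at this
    rw [hslice, pvPrepend_nil] at this
    simpa using this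
  rw [hA', hB']

-- ===== VERDICT (by name: the statement is the Claim_ definition above) =====
theorem split_by_max_hash_spec : Claim_equal_split_by_max_hash := by
  intro chunks m _ _
  unfold Spec_split_by_max_hash
  exact pv_eq chunks m
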